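-- pv_equiv track=rewrite | github.com/CalebFields/AlbumHub | api/discogs_client.py | get_best_image_url
-- ===== SOURCE A (Python) =====
-- def get_best_image_url(images):
--     # Pick the primary image if available, otherwise the first available
--     for img in images or []:
--         if img.get('type') == 'primary' and img.get('uri'):
--             return img['uri']
--     for img in images or []:
--         if img.get('uri'):
--             return img['uri']
--     return None
-- ===== SOURCE B (Python) =====
-- def get_best_image_url(images):
--     # Single pass: return the first primary uri immediately; remember the
--     # first available uri as a fallback along the way.
--     fallback = None
--     for img in images or []:
--         uri = img.get('uri')
--         if uri:
--             if img.get('type') == 'primary':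
--                 return uri
--             if fallback is None:
--                 fallback = uri
--     return fallback
-- ===== Notes on version B (the rewrite author's own statement) =====
-- stated objective: alternative
-- what changed: Replaced A's two sequential scans (first for a primary image, then for any image with a uri) by one pass that returns the first primary uri immediately and records the first available uri as a fallback.
import Mathlib
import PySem

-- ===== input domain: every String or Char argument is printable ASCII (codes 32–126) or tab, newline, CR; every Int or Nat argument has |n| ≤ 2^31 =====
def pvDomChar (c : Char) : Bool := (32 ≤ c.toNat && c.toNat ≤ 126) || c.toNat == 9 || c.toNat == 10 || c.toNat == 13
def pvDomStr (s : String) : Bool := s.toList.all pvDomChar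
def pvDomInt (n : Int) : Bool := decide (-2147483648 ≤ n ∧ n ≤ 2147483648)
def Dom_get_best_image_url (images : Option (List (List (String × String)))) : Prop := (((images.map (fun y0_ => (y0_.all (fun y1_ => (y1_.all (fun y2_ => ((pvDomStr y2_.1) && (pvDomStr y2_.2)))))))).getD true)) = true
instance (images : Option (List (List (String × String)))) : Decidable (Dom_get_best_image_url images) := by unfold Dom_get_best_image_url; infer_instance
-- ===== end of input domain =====

-- B replaces A's two sequential scans by a single pass carrying a fallback (objective: alternative decomposition; same return value).

-- shared helpers: img.get(k) on the association-list dict, and Python truthiness of an optional string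
def pvDGet (img : List (String × String)) (k : String) : Option String :=
  (PySem.Dict.mk img).get? k

def pvTruthy : Option String → Bool
  | none => false
  | some s => !(s == "")

-- ===== PORT A =====
-- first loop: primary image with a truthy uri
def pvLoopA1 : List (List (String × String)) → Option String
  | [] => none
  | img :: rest =>
    if (pvDGet img "type" == some "primary") && pvTruthy (pvDGet img "uri") then
      pvDGet img "uri"
    else pvLoopA1 rest

-- second loop: first image with a truthy uri
def pvLoopA2 : List (List (String × String)) → Option String
  | [] => none
  | img :: rest =>
    if pvTruthy (pvDGet img "uri") then pvDGet img "uri" else pvLoopA2 rest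

def get_best_image_url (images : Option (List (List (String × String)))) : Option String :=
  let xs := images.getD []        -- images or []
  match pvLoopA1 xs with
  | some u => some u
  | none => pvLoopA2 xs

-- ===== PORT B =====
-- single pass with fallback accumulator
def pvLoopB : List (List (String × String)) → Option String → Option String
  | [], fb => fb
  | img :: rest, fb =>
    let uri := pvDGet img "uri"
    if pvTruthy uri then
      if pvDGet img "type" == some "primary" then uri
      else pvLoopB rest (if fb.isNone then uri else fb)
    else pvLoopB rest fb

def get_best_image_url_alt (images : Option (List (List (String × String)))) : Option String :=
  pvLoopB (images.getD []) none

-- ===== PRECONDITION & SPEC =====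
def Spec_get_best_image_url (images : Option (List (List (String × String)))) (out : Option String) : Prop := out = get_best_image_url_alt images
instance (images : Option (List (List (String × String)))) (out : Option String) : Decidable (Spec_get_best_image_url images out) := by unfold Spec_get_best_image_url; infer_instance

-- ===== CLAIM (what is proved, stated in full; the proofs are below) =====
def Claim_equal_get_best_image_url : Prop := ∀ (images : Option (List (List (String × String)))), Dom_get_best_image_url images → Spec_get_best_image_url images (get_best_image_url images)

-- ===== LEMMAS AND PROOFS =====
theorem pvTruthy_some {o : Option String} (h : pvTruthy o = true) : ∃ u, o = some u := by
  cases o with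
  | none => simp [pvTruthy] at h
  | some u => exact ⟨u, rfl⟩

theorem pvLoopB_eq (xs : List (List (String × String))) :
    ∀ fb, pvLoopB xs fb = (pvLoopA1 xs).or (fb.or (pvLoopA2 xs)) := by
  induction xs with
  | nil => intro fb; cases fb <;> simp [pvLoopB, pvLoopA1, pvLoopA2]
  | cons img rest ih =>
    intro fb
    by_cases hu : pvTruthy (pvDGet img "uri") = true
    · obtain ⟨u, hsome⟩ := pvTruthy_some hu
      rw [hsome] at hu
      by_cases hp : (pvDGet img "type" == some "primary") = true
      · simp [pvLoopB, pvLoopA1, hu, hp, hsome]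
      · cases fb <;> cases h1 : pvLoopA1 rest <;>
          simp [pvLoopB, pvLoopA1, pvLoopA2, hu, hp, ih, hsome, h1]
    · simp [pvLoopB, pvLoopA1, pvLoopA2, hu, ih]

-- ===== VERDICT (by name: the statement is the Claim_ definition above) =====
theorem get_best_image_url_spec : Claim_equal_get_best_image_url := by
  intro images _
  unfold Spec_get_best_image_url get_best_image_url get_best_image_url_alt
  rw [pvLoopB_eq]
  cases h : pvLoopA1 (images.getD []) <;> simp [Option.or, h]
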